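-- pv_equiv track=rewrite | github.com/ErikM1974/sanmar-inventory-app | mock_data.py | get_color_swatch_url
-- ===== SOURCE A (Python) =====
-- BRAND_PREFIXES = {
--     "PC": "port",  # Port & Company
--     "K": "port",   # Port Authority
--     "ST": "sport", # Sport-Tek
--     "DT": "dist",  # District
--     "G": "gildan", # Gildan
--     "L": "port",   # Port Authority Ladies
--     "J": "port",   # Port Authority Outerwear
--     "TW": "port",  # Port Authority Tall
--     "LW": "port",  # Port Authority Ladies Outerwear
--     "BG": "port",  # Port Authority Bags
--     "CP": "cp",    # CornerStone
--     "CS": "cs",    # CornerStone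
--     "RH": "red",   # Red House
--     "NKDC": "nike", # Nike
--     "OGIO": "ogio", # OGIO
--     "EB": "eb",    # Eddie Bauer
--     "NF": "nf",    # North Face
--     "": "port"     # Default to Port Authority
-- }
--
-- def get_color_swatch_url(style, color):
--     """
--     Get the URL for a color swatch from SanMar
--
--     Args:
--         style (str): The product style number
--         color (str): The color name
--
--     Returns:
--         str: URL to the color swatch image
--     """
--     # Default to Port & Company if we can't determine the brand
--     brand_prefix = "port"
--
--     # Try to determine the brand prefix from the style number
--     style = style.upper()
--     for prefix, brand in BRAND_PREFIXES.items():
--         if style.startswith(prefix):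
--             brand_prefix = brand
--             break
--
--     # Format the color for the URL
--     color_formatted = color.lower().replace(" ", "_")
--
--     # Return the full swatch URL
--     # Example: https://cdnm.sanmar.com/swatch/gifs/port_black.gif
--     return f"https://cdnm.sanmar.com/swatch/gifs/{brand_prefix}_{color_formatted}.gif"
-- ===== SOURCE B (Python) =====
-- BRAND_PREFIXES = {
--     "PC": "port",  # Port & Company
--     "K": "port",   # Port Authority
--     "ST": "sport", # Sport-Tek
--     "DT": "dist",  # District
--     "G": "gildan", # Gildan
--     "L": "port",   # Port Authority Ladies
--     "J": "port",   # Port Authority Outerwear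
--     "TW": "port",  # Port Authority Tall
--     "LW": "port",  # Port Authority Ladies Outerwear
--     "BG": "port",  # Port Authority Bags
--     "CP": "cp",    # CornerStone
--     "CS": "cs",    # CornerStone
--     "RH": "red",   # Red House
--     "NKDC": "nike", # Nike
--     "OGIO": "ogio", # OGIO
--     "EB": "eb",    # Eddie Bauer
--     "NF": "nf",    # North Face
--     "": "port"     # Default to Port Authority
-- }
--
-- _MAX_PREFIX_LEN = max(len(p) for p in BRAND_PREFIXES)
--
-- def get_color_swatch_url(style, color):
--     """Longest-prefix dict lookup over leading substrings of the style number."""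
--     style = style.upper()
--     brand_prefix = "port"
--     for i in range(min(len(style), _MAX_PREFIX_LEN), -1, -1):
--         brand = BRAND_PREFIXES.get(style[:i])
--         if brand is not None:
--             brand_prefix = brand
--             break
--     color_formatted = color.lower().replace(" ", "_")
--     return f"https://cdnm.sanmar.com/swatch/gifs/{brand_prefix}_{color_formatted}.gif"
-- ===== Notes on version B (the rewrite author's own statement) =====
-- stated objective: idiomatic
-- what changed: B replaces A's insertion-order scan over all dict entries with startswith by a longest-prefix dict lookup over the leading substrings style[:i] for i from min(len(style), max key length) down to 0; this is equivalent because the only nested keys ('', 'L'/'LW') all map to 'port'.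
import Mathlib
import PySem

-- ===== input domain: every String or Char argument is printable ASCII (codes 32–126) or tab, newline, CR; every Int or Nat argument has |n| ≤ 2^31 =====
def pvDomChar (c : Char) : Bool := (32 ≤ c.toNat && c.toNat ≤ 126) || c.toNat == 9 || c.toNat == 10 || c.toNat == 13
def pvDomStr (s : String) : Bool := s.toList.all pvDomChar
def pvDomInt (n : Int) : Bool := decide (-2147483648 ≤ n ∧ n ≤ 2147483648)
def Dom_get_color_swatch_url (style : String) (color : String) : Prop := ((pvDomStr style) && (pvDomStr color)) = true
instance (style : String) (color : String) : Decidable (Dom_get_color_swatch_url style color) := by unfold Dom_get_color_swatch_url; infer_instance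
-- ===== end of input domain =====

-- B replaces A's insertion-order scan of the dict entries with startswith by a longest-prefix dict
-- lookup over leading substrings of the style (idiomatic; same cost, the dict is tiny).

-- the module constant BRAND_PREFIXES (a dict literal; its 18 keys are distinct, so insertion order is the literal order)
def pyBRAND_PREFIXES : List (String × String) :=
  [("PC","port"),("K","port"),("ST","sport"),("DT","dist"),("G","gildan"),
   ("L","port"),("J","port"),("TW","port"),("LW","port"),("BG","port"),
   ("CP","cp"),("CS","cs"),("RH","red"),("NKDC","nike"),("OGIO","ogio"),
   ("EB","eb"),("NF","nf"),("","port")]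

-- ===== PORT A =====
-- A's loop: first entry (prefix, brand) of BRAND_PREFIXES with style.startswith(prefix) wins;
-- if none matches (never happens: "" is a key) brand_prefix keeps its initial value "port".
def pvScanA (u : String) : List (String × String) → String
  | [] => "port"
  | (p, b) :: rest => if PySem.Str.startswith u p then b else pvScanA u rest

def get_color_swatch_url (style : String) (color : String) : String :=
  let styleU := PySem.Str.upper style
  let brand_prefix := pvScanA styleU pyBRAND_PREFIXES
  let color_formatted := PySem.Str.replace (PySem.Str.lower color) " " "_"
  "https://cdnm.sanmar.com/swatch/gifs/" ++ brand_prefix ++ "_" ++ color_formatted ++ ".gif"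

-- ===== PORT B =====
-- _MAX_PREFIX_LEN = max(len(p) for p in BRAND_PREFIXES)
def pvMaxPrefixLen : Nat :=
  pyBRAND_PREFIXES.foldl (fun m kv => max m kv.1.toList.length) 0

-- B's loop: i counts down from min(len(style), _MAX_PREFIX_LEN) to 0; the first style[:i] that is a
-- dict key wins ("" is a key, so i = 0 always hits; .getD "port" renders "brand_prefix stays 'port'
-- when the loop ends without a break").
def pvLookup (u : String) : Nat → String
  | 0 => ((PySem.Dict.ofList pyBRAND_PREFIXES).get? (PySem.Str.slice u none (some 0))).getD "port"
  | (i+1) =>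
    match (PySem.Dict.ofList pyBRAND_PREFIXES).get? (PySem.Str.slice u none (some ((i:Int)+1))) with
    | some b => b
    | none => pvLookup u i

def get_color_swatch_url_alt (style : String) (color : String) : String :=
  let styleU := PySem.Str.upper style
  let brand_prefix := pvLookup styleU (min styleU.toList.length pvMaxPrefixLen)
  let color_formatted := PySem.Str.replace (PySem.Str.lower color) " " "_"
  "https://cdnm.sanmar.com/swatch/gifs/" ++ brand_prefix ++ "_" ++ color_formatted ++ ".gif"

-- ===== PRECONDITION & SPEC =====
def Spec_get_color_swatch_url (style : String) (color : String) (out : String) : Prop := out = get_color_swatch_url_alt style color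
instance (style : String) (color : String) (out : String) : Decidable (Spec_get_color_swatch_url style color out) := by unfold Spec_get_color_swatch_url; infer_instance

-- ===== CLAIM (what is proved, stated in full; the proofs are below) =====
def Claim_equal_get_color_swatch_url : Prop := ∀ (style : String) (color : String), Dom_get_color_swatch_url style color → Spec_get_color_swatch_url style color (get_color_swatch_url style color)

-- ===== LEMMAS AND PROOFS =====

-- String `==` is `==` on the underlying char lists
theorem pvBeq_toList (s t : String) : (s == t) = (s.toList == t.toList) := by
  by_cases h : s = t
  · subst h; simp
  · have h2 : s.toList ≠ t.toList := fun hh => h (by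
      have := congrArg String.ofList hh; simpa using this)
    simp [h, h2]

-- core: the first-match scan over dict entries equals the longest-prefix countdown lookup
set_option maxHeartbeats 2000000 in
theorem pvMaster (l : List Char) :
    pvScanA (String.ofList l) pyBRAND_PREFIXES
      = pvLookup (String.ofList l) (min l.length pvMaxPrefixLen) := by
  have hm : pvMaxPrefixLen = 4 := by decide
  have hd : PySem.Dict.ofList pyBRAND_PREFIXES = PySem.Dict.mk pyBRAND_PREFIXES := by decide
  rw [hm]
  rcases l with _|⟨a, _|⟨b, _|⟨c, _|⟨d, rest⟩⟩⟩⟩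
  · decide
  case cons.nil =>
    simp only [pvScanA, pyBRAND_PREFIXES]
    norm_num
    simp only [pvLookup]
    rw [hd]
    simp only [pyBRAND_PREFIXES, PySem.Dict.get?_mk_cons, PySem.Str.slice, String.toList_ofList,
               PySem.Chars.slice_eq_listSlice, pvBeq_toList]
    norm_num
    simp [PySem.List.slice_to]
    simp [PySem.Chars.startswith, List.isPrefixOf, PySem.Dict.get?]
    clear hd
    by_cases h1 : 'P' = a
    · subst h1; simp
    by_cases h2 : 'K' = a
    · subst h2; simp
    by_cases h3 : 'S' = a
    · subst h3; simp
    by_cases h4 : 'D' = a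
    · subst h4; simp
    by_cases h5 : 'G' = a
    · subst h5; simp
    by_cases h6 : 'L' = a
    · subst h6; simp
    by_cases h7 : 'J' = a
    · subst h7; simp
    by_cases h8 : 'T' = a
    · subst h8; simp
    by_cases h9 : 'B' = a
    · subst h9; simp
    by_cases h10 : 'C' = a
    · subst h10; simp
    by_cases h11 : 'R' = a
    · subst h11; simp
    by_cases h12 : 'N' = a
    · subst h12; simp
    by_cases h13 : 'O' = a
    · subst h13; simp
    by_cases h14 : 'E' = a
    · subst h14; simp
    simp [h2, h5, h6, h7]
  case cons.cons.nil =>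
    simp only [pvScanA, pyBRAND_PREFIXES]
    norm_num
    simp only [pvLookup]
    rw [hd]
    simp only [pyBRAND_PREFIXES, PySem.Dict.get?_mk_cons, PySem.Str.slice, String.toList_ofList,
               PySem.Chars.slice_eq_listSlice, pvBeq_toList]
    norm_num
    simp [PySem.List.slice_to]
    simp [PySem.Chars.startswith, List.isPrefixOf, PySem.Dict.get?]
    clear hd
    by_cases h1 : 'P' = a
    · subst h1; simp; try split_ifs <;> rfl
    by_cases h2 : 'K' = a
    · subst h2; simp
    by_cases h3 : 'S' = a
    · subst h3; simp; try split_ifs <;> rfl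
    by_cases h4 : 'D' = a
    · subst h4; simp; try split_ifs <;> rfl
    by_cases h5 : 'G' = a
    · subst h5; simp
    by_cases h6 : 'L' = a
    · subst h6; simp; try split_ifs <;> rfl
    by_cases h7 : 'J' = a
    · subst h7; simp
    by_cases h8 : 'T' = a
    · subst h8; simp; try split_ifs <;> rfl
    by_cases h9 : 'B' = a
    · subst h9; simp; try split_ifs <;> rfl
    by_cases h10 : 'C' = a
    · subst h10; simp; try split_ifs <;> rfl
    by_cases h11 : 'R' = a
    · subst h11; simp; try split_ifs <;> rfl
    by_cases h12 : 'N' = a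
    · subst h12; simp; try split_ifs <;> rfl
    by_cases h13 : 'O' = a
    · subst h13; simp
    by_cases h14 : 'E' = a
    · subst h14; simp; try split_ifs <;> rfl
    simp [h1, h2, h3, h4, h5, h6, h7, h8, h9, h10, h11, h12, h14]
  case cons.cons.cons.nil =>
    simp only [pvScanA, pyBRAND_PREFIXES]
    norm_num
    simp only [pvLookup]
    rw [hd]
    simp only [pyBRAND_PREFIXES, PySem.Dict.get?_mk_cons, PySem.Str.slice, String.toList_ofList,
               PySem.Chars.slice_eq_listSlice, pvBeq_toList]
    norm_num
    simp [PySem.List.slice_to]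
    simp [PySem.Chars.startswith, List.isPrefixOf, PySem.Dict.get?]
    clear hd
    by_cases h1 : 'P' = a
    · subst h1; simp; try split_ifs <;> rfl
    by_cases h2 : 'K' = a
    · subst h2; simp
    by_cases h3 : 'S' = a
    · subst h3; simp; try split_ifs <;> rfl
    by_cases h4 : 'D' = a
    · subst h4; simp; try split_ifs <;> rfl
    by_cases h5 : 'G' = a
    · subst h5; simp
    by_cases h6 : 'L' = a
    · subst h6; simp; try split_ifs <;> rfl
    by_cases h7 : 'J' = a
    · subst h7; simp
    by_cases h8 : 'T' = a
    · subst h8; simp; try split_ifs <;> rfl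
    by_cases h9 : 'B' = a
    · subst h9; simp; try split_ifs <;> rfl
    by_cases h10 : 'C' = a
    · subst h10; simp; try split_ifs <;> rfl
    by_cases h11 : 'R' = a
    · subst h11; simp; try split_ifs <;> rfl
    by_cases h12 : 'N' = a
    · subst h12; simp; try split_ifs <;> rfl
    by_cases h13 : 'O' = a
    · subst h13; simp
    by_cases h14 : 'E' = a
    · subst h14; simp; try split_ifs <;> rfl
    simp [h1, h2, h3, h4, h5, h6, h7, h8, h9, h10, h11, h12, h14]
  case cons.cons.cons.cons =>
    have hmin : min (a::b::c::d::rest).length 4 = 4 := by simp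
    rw [hmin]
    simp only [pvScanA, pyBRAND_PREFIXES]
    simp only [pvLookup]
    rw [hd]
    simp only [pyBRAND_PREFIXES, PySem.Dict.get?_mk_cons, PySem.Str.slice, String.toList_ofList,
               PySem.Chars.slice_eq_listSlice, pvBeq_toList]
    norm_num
    simp [PySem.List.slice_to]
    simp [PySem.Chars.startswith, List.isPrefixOf, PySem.Dict.get?]
    clear hd
    by_cases h1 : 'P' = a
    · subst h1; simp; try split_ifs <;> rfl
    by_cases h2 : 'K' = a
    · subst h2; simp
    by_cases h3 : 'S' = a
    · subst h3; simp; try split_ifs <;> rfl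
    by_cases h4 : 'D' = a
    · subst h4; simp; try split_ifs <;> rfl
    by_cases h5 : 'G' = a
    · subst h5; simp
    by_cases h6 : 'L' = a
    · subst h6; simp; try split_ifs <;> rfl
    by_cases h7 : 'J' = a
    · subst h7; simp
    by_cases h8 : 'T' = a
    · subst h8; simp; try split_ifs <;> rfl
    by_cases h9 : 'B' = a
    · subst h9; simp; try split_ifs <;> rfl
    by_cases h10 : 'C' = a
    · subst h10; simp; try split_ifs <;> rfl
    by_cases h11 : 'R' = a
    · subst h11; simp; try split_ifs <;> rfl
    by_cases h12 : 'N' = a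
    · subst h12; simp; try split_ifs <;> rfl
    by_cases h13 : 'O' = a
    · subst h13; simp; try split_ifs <;> rfl
    by_cases h14 : 'E' = a
    · subst h14; simp; try split_ifs <;> rfl
    simp [h1, h2, h3, h4, h5, h6, h7, h8, h9, h10, h11, h12, h13, h14]

-- ===== VERDICT (by name: the statement is the Claim_ definition above) =====
theorem get_color_swatch_url_spec : Claim_equal_get_color_swatch_url := by
  intro style color _
  unfold Spec_get_color_swatch_url get_color_swatch_url get_color_swatch_url_alt
  have h := pvMaster (PySem.Str.upper style).toList
  rw [String.ofList_toList] at h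
  show ("https://cdnm.sanmar.com/swatch/gifs/" ++ pvScanA (PySem.Str.upper style) pyBRAND_PREFIXES
      ++ "_" ++ PySem.Str.replace (PySem.Str.lower color) " " "_" ++ ".gif") = _
  rw [h]
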